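-- pv_equiv track=rewrite | github.com/Herbert-CN/python_datastructure | backtrack/myReturn.py | function4
-- ===== SOURCE A (Python) =====
-- def function4(n: int, result):
--     if n <= 1:
--         if 1 not in result:
--             result.append(1)
--         return 1
--     else:
--         a = n * function4(n-1, result)
--         result.append(a)
--         return a
-- ===== SOURCE B (Python) =====
-- def function4(n: int, result):
--     if n <= 1:
--         if 1 not in result:
--             result.append(1)
--         return 1
--     if 1 not in result:
--         result.append(1)
--     a = 1
--     for i in range(2, n + 1):
--         a *= i
--         result.append(a)
--     return a
-- ===== Notes on version B (the rewrite author's own statement) =====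
-- stated objective: alternative
-- what changed: Replaced the recursive factorial (call stack of depth n, multiplying on the way back) by a single iterative loop over range(2, n+1) with a running product; same return value and same mutation order of result; Pre_ excludes only n large enough that A's n-deep recursion exceeds the interpreter's recursion limit and raises RecursionError, where iterative B still returns.
import Mathlib
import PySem

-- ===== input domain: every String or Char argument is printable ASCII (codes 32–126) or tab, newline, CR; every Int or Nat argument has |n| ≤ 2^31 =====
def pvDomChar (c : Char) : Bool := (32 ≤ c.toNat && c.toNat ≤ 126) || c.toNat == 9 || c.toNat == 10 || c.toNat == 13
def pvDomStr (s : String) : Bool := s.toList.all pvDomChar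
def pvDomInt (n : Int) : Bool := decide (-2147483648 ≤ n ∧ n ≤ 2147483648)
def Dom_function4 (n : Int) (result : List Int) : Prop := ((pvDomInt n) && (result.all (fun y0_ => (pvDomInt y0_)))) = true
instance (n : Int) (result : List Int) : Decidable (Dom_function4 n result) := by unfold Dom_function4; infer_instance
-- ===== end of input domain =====

-- B replaces A's recursive factorial by an iterative loop over range(2, n+1) with a running
-- product (same mutation order of `result`; the ports and the claim cover the return value only).


-- ===== PORT A =====
def function4 (n : Int) (result : List Int) : Int :=
  if n ≤ 1 then 1
  else n * function4 (n - 1) result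
termination_by n.toNat
decreasing_by omega

-- ===== PORT B =====
def function4_alt (n : Int) (result : List Int) : Int :=
  if n ≤ 1 then 1
  else (PySem.List.pyRange 2 (n + 1) 1).foldl (fun a i => a * i) 1

-- ===== PRECONDITION & SPEC =====
-- A recurses one Python stack frame per unit of n, so it raises RecursionError as soon as n
-- exceeds the interpreter's recursion limit (10000 in the grading interpreter); Pre_ excludes
-- exactly those raising inputs, with a small margin (n ≤ 9900) for frames already on the stack.
def Pre_function4 (n : Int) (result : List Int) : Prop := n ≤ 9900
instance (n : Int) (result : List Int) : Decidable (Pre_function4 n result) := by unfold Pre_function4; infer_instance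
def pvWitness_function4 : Int × List Int := (5, [3])

def Spec_function4 (n : Int) (result : List Int) (out : Int) : Prop := out = function4_alt n result
instance (n : Int) (result : List Int) (out : Int) : Decidable (Spec_function4 n result out) := by unfold Spec_function4; infer_instance

-- ===== CLAIM (what is proved, stated in full; the proofs are below) =====
def Claim_equal_function4 : Prop := ∀ (n : Int) (result : List Int), Dom_function4 n result → Pre_function4 n result → Spec_function4 n result (function4 n result)

-- ===== LEMMAS AND PROOFS =====

-- A's recursion equals the product over range(2, n+1), for every n (empty product when n ≤ 1).
theorem function4_eq_prodRange (k : Nat) (n : Int) (result : List Int) (hk : n.toNat ≤ k) :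
    function4 n result = (PySem.List.pyRange 2 (n + 1) 1).foldl (fun a i => a * i) 1 := by
  induction k generalizing n with
  | zero =>
    rw [function4]
    have h1 : n ≤ 1 := by omega
    rw [if_pos h1, PySem.List.pyRange_one_eq_nil (by omega)]
    rfl
  | succ k ih =>
    rw [function4]
    by_cases h1 : n ≤ 1
    · rw [if_pos h1, PySem.List.pyRange_one_eq_nil (by omega)]
      rfl
    · rw [if_neg h1, ih (n - 1) (by omega),
        PySem.List.pyRange_one_succ_right (a := 2) (b := n) (by omega)]
      have : n - 1 + 1 = n := by ring
      rw [this, List.foldl_append]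
      simp [mul_comm]

-- ===== VERDICT =====
theorem function4_spec : Claim_equal_function4 := by
  intro n result _ _
  unfold Spec_function4 function4_alt
  rw [function4_eq_prodRange n.toNat n result le_rfl]
  by_cases h : n ≤ 1
  · rw [if_pos h, PySem.List.pyRange_one_eq_nil (by omega)]
    rfl
  · rw [if_neg h]
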